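-- pv_equiv track=rewrite | github.com/TanJingXuan-06/Project-2 | main.py | numOfPeaks
-- ===== SOURCE A (Python) =====
-- PEAK_THRESHOLD = 1500
--
-- def numOfPeaks(adc_values) :
--
--     peak = None
--     zero = 0
--     peak_counter = 0
--
--     for idx in range (len(adc_values)-1) :
--
--         # Ignore the first data
--         if idx > 0 :
--             # If this a peak
--             if (adc_values[idx] > adc_values[idx+1]) and (adc_values[idx] > adc_values[idx-1]) :
--
--                 # if data_count is 0 means this is the first peak
--                 if peak == None and zero == 0 :
--                     peak = adc_values[idx]
--
--                     if adc_values[idx] > PEAK_THRESHOLD :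
--                         peak_counter += 1
--
--                 # not the first peak
--                 elif zero == 0 :
--                     peak = adc_values[idx]
--
--                     if adc_values[idx] > PEAK_THRESHOLD :
--                         peak_counter += 1
--
--                 zero = adc_values[idx]
--
--             if adc_values[idx] == 0 :
--                 zero = 0
--
--     return peak_counter
-- ===== SOURCE B (Python) =====
-- PEAK_THRESHOLD = 1500
--
-- def numOfPeaks(adc_values):
--     # Re-arming pulse counter: zeros in the signal re-arm the detector, and
--     # between zeros only the first strict local peak can fire.  So split the
--     # inner indices into maximal zero-free segments and count one per segment
--     # whose first strict local peak exceeds the threshold.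
--     n = len(adc_values)
--     last = n - 2
--     count = 0
--     i = 1
--     while i <= last:
--         if adc_values[i] == 0:
--             i += 1
--             continue
--         j = i
--         while j <= last and adc_values[j] != 0:
--             j += 1
--         for k in range(i, j):
--             if adc_values[k] > adc_values[k - 1] and adc_values[k] > adc_values[k + 1]:
--                 if adc_values[k] > PEAK_THRESHOLD:
--                     count += 1
--                 break
--         i = j
--     return count
-- ===== Notes on version B (the rewrite author's own statement) =====
-- stated objective: alternative
-- what changed: B replaces A's single stateful loop (sentinel 'peak'/'zero' variables acting as a gate) by a segment decomposition: it splits the inner indices into maximal zero-free runs and, per run, counts one if the run's first strict local peak exceeds the threshold.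
import Mathlib
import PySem

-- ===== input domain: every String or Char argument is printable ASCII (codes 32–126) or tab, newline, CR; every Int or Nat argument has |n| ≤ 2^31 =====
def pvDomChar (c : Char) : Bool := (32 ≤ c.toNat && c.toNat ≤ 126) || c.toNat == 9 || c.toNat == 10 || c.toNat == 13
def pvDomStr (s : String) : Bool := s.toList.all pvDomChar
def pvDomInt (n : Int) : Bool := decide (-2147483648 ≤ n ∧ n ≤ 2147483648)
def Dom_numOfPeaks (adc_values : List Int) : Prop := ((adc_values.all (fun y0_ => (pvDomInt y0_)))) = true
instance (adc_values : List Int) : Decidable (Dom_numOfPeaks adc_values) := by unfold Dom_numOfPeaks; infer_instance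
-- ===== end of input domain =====

-- B replaces A's single stateful gate loop by a segment decomposition (split the inner
-- indices at zero values, count one per zero-free run whose first strict local peak
-- exceeds the threshold); objective: alternative (same cost, different algorithm).

def PEAK_THRESHOLD : Int := 1500

-- ===== PORT A =====
-- loop body of A, state = (peak, zero, peak_counter)
def stepA (xs : List Int) (s : Option Int × Int × Int) (idx : Int) : Option Int × Int × Int :=
  if idx > 0 then
    let v := PySem.List.pyGetD xs idx 0
    let s1 :=
      if v > PySem.List.pyGetD xs (idx + 1) 0 ∧ v > PySem.List.pyGetD xs (idx - 1) 0 then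
        if s.1 = none ∧ s.2.1 = 0 then
          (some v, v, if v > PEAK_THRESHOLD then s.2.2 + 1 else s.2.2)
        else if s.2.1 = 0 then
          (some v, v, if v > PEAK_THRESHOLD then s.2.2 + 1 else s.2.2)
        else (s.1, v, s.2.2)
      else s
    if v = 0 then (s1.1, 0, s1.2.2) else s1
  else s

def numOfPeaks (adc_values : List Int) : Int :=
  ((PySem.List.pyRange 0 ((adc_values.length : Int) - 1) 1).foldl (stepA adc_values)
    (none, 0, 0)).2.2

-- ===== PORT B =====
-- inner while-loop of B: advance j while j ≤ last and adc_values[j] != 0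
def segEndB (xs : List Int) (last j : Int) : Int :=
  if h : j ≤ last ∧ PySem.List.pyGetD xs j 0 ≠ 0 then segEndB xs last (j + 1) else j
termination_by (last + 1 - j).toNat
decreasing_by omega

-- for-loop of B over range(i, j) with break at the first strict local peak
def firstPeakB (xs : List Int) : List Int → Int → Int
  | [], count => count
  | k :: ks, count =>
    if PySem.List.pyGetD xs k 0 > PySem.List.pyGetD xs (k - 1) 0 ∧
        PySem.List.pyGetD xs k 0 > PySem.List.pyGetD xs (k + 1) 0 then
      if PySem.List.pyGetD xs k 0 > PEAK_THRESHOLD then count + 1 else count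
    else firstPeakB xs ks count

-- needed by outerB's termination proof: segEndB never moves left
lemma segEndB_le (xs : List Int) (last : Int) (j : Int) : j ≤ segEndB xs last j := by
  suffices H : ∀ (k : Nat) (j : Int), (last + 1 - j).toNat ≤ k → j ≤ segEndB xs last j from
    H (last + 1 - j).toNat j le_rfl
  intro k
  induction k with
  | zero =>
      intro j hk
      rw [segEndB]
      split
      · next h => omega
      · exact le_rfl
  | succ k ih =>
      intro j hk
      rw [segEndB]
      split
      · next h => exact le_trans (by omega) (ih (j + 1) (by omega))
      · exact le_rfl

-- outer while-loop of B, state = (i, count)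
def outerB (xs : List Int) (last : Int) (i : Int) (count : Int) : Int :=
  if hi : i ≤ last then
    if hv : PySem.List.pyGetD xs i 0 = 0 then outerB xs last (i + 1) count
    else
      outerB xs last (segEndB xs last i)
        (firstPeakB xs (PySem.List.pyRange i (segEndB xs last i) 1) count)
  else count
termination_by (last + 1 - i).toNat
decreasing_by
  · omega
  · have h1 : i + 1 ≤ segEndB xs last (i + 1) := segEndB_le xs last (i + 1)
    have h2 : segEndB xs last i = segEndB xs last (i + 1) := by
      rw [segEndB]; exact dif_pos ⟨hi, hv⟩
    omega

def numOfPeaks_alt (adc_values : List Int) : Int :=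
  outerB adc_values ((adc_values.length : Int) - 2) 1 0

-- ===== PRECONDITION & SPEC =====
def Spec_numOfPeaks (adc_values : List Int) (out : Int) : Prop := out = numOfPeaks_alt adc_values
instance (adc_values : List Int) (out : Int) : Decidable (Spec_numOfPeaks adc_values out) := by unfold Spec_numOfPeaks; infer_instance

-- ===== CLAIM (what is proved, stated in full; the proofs are below) =====
def Claim_equal_numOfPeaks : Prop := ∀ (adc_values : List Int), Dom_numOfPeaks adc_values → Spec_numOfPeaks adc_values (numOfPeaks adc_values)

-- ===== LEMMAS AND PROOFS =====

lemma segEndB_step (xs : List Int) (last i : Int) (hi : i ≤ last)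
    (hv : PySem.List.pyGetD xs i 0 ≠ 0) :
    segEndB xs last i = segEndB xs last (i + 1) := by
  rw [segEndB]; exact dif_pos ⟨hi, hv⟩

lemma segEndB_stop (xs : List Int) (last i : Int)
    (h : ¬ (i ≤ last ∧ PySem.List.pyGetD xs i 0 ≠ 0)) :
    segEndB xs last i = i := by
  rw [segEndB]; exact dif_neg h

-- unfolding outerB through one whole segment, valid for every i
lemma outerB_eq_seg (xs : List Int) (last i c : Int) :
    outerB xs last i c
      = outerB xs last (segEndB xs last i)
          (firstPeakB xs (PySem.List.pyRange i (segEndB xs last i) 1) c) := by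
  by_cases hi : i ≤ last
  · by_cases hv : PySem.List.pyGetD xs i 0 = 0
    · have hs : segEndB xs last i = i := segEndB_stop xs last i (by simp [hv])
      rw [hs, PySem.List.pyRange_one_eq_nil (le_refl i)]
      rfl
    · rw [outerB]; rw [dif_pos hi, dif_neg hv]
  · have hs : segEndB xs last i = i := segEndB_stop xs last i (by tauto)
    rw [hs, PySem.List.pyRange_one_eq_nil (le_refl i)]
    rfl

-- evaluations of A's loop body under the four case splits
lemma stepA_zero (xs : List Int) (i : Int) (hi : 0 < i)
    (hv : PySem.List.pyGetD xs i 0 = 0) (p : Option Int) (z c : Int) :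
    ∃ p', stepA xs (p, z, c) i = (p', 0, c) := by
  simp only [stepA, if_pos hi, hv]
  split_ifs with h1 h2 h3 h4 h5 h6 <;>
    first
      | exact absurd ‹(0 : Int) > PEAK_THRESHOLD› (by decide)
      | exact ⟨_, rfl⟩

lemma stepA_nopeak (xs : List Int) (i : Int) (hi : 0 < i)
    (hv : PySem.List.pyGetD xs i 0 ≠ 0)
    (hpk : ¬ (PySem.List.pyGetD xs i 0 > PySem.List.pyGetD xs (i + 1) 0 ∧
              PySem.List.pyGetD xs i 0 > PySem.List.pyGetD xs (i - 1) 0))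
    (p : Option Int) (z c : Int) :
    stepA xs (p, z, c) i = (p, z, c) := by
  simp only [stepA, if_pos hi]
  rw [if_neg hpk, if_neg hv]

lemma stepA_peak_open (xs : List Int) (i : Int) (hi : 0 < i)
    (hv : PySem.List.pyGetD xs i 0 ≠ 0)
    (hpk : PySem.List.pyGetD xs i 0 > PySem.List.pyGetD xs (i + 1) 0 ∧
           PySem.List.pyGetD xs i 0 > PySem.List.pyGetD xs (i - 1) 0)
    (p : Option Int) (c : Int) :
    stepA xs (p, (0 : Int), c) i
      = (some (PySem.List.pyGetD xs i 0), PySem.List.pyGetD xs i 0,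
         if PySem.List.pyGetD xs i 0 > PEAK_THRESHOLD then c + 1 else c) := by
  simp only [stepA, if_pos hi]
  rw [if_pos hpk, if_neg hv]
  rcases p with _ | p0 <;> simp

lemma stepA_peak_closed (xs : List Int) (i : Int) (hi : 0 < i)
    (hv : PySem.List.pyGetD xs i 0 ≠ 0)
    (hpk : PySem.List.pyGetD xs i 0 > PySem.List.pyGetD xs (i + 1) 0 ∧
           PySem.List.pyGetD xs i 0 > PySem.List.pyGetD xs (i - 1) 0)
    (p : Option Int) (z c : Int) (hz : z ≠ 0) :
    stepA xs (p, z, c) i = (p, PySem.List.pyGetD xs i 0, c) := by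
  simp only [stepA, if_pos hi]
  rw [if_pos hpk, if_neg (by simp [hz] : ¬ (p = none ∧ z = 0)), if_neg hz, if_neg hv]

-- the joint loop invariant: A's fold from an open state is outerB, from a closed
-- state it is outerB resumed at the end of the current zero-free run
lemma mainInv (xs : List Int) (last : Int) :
    ∀ (k : Nat) (i : Int), (last + 1 - i).toNat ≤ k → 0 < i →
      (∀ (p : Option Int) (c : Int),
        ((PySem.List.pyRange i (last + 1) 1).foldl (stepA xs) (p, 0, c)).2.2
          = outerB xs last i c)
      ∧ (∀ (p : Option Int) (z c : Int), z ≠ 0 →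
        ((PySem.List.pyRange i (last + 1) 1).foldl (stepA xs) (p, z, c)).2.2
          = outerB xs last (segEndB xs last i) c) := by
  intro k
  induction k with
  | zero =>
      intro i hk hi0
      have hi : ¬ i ≤ last := by omega
      have hnil : PySem.List.pyRange i (last + 1) 1 = [] :=
        PySem.List.pyRange_one_eq_nil (by omega)
      constructor
      · intro p c
        rw [hnil]
        simp only [List.foldl_nil]
        rw [outerB]; rw [dif_neg hi]
      · intro p z c hz
        rw [hnil]
        simp only [List.foldl_nil]
        rw [segEndB_stop xs last i (by tauto)]
        rw [outerB]; rw [dif_neg hi]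
  | succ k ih =>
      intro i hk hi0
      by_cases hi : i ≤ last
      · have hcons : PySem.List.pyRange i (last + 1) 1
            = i :: PySem.List.pyRange (i + 1) (last + 1) 1 :=
          PySem.List.pyRange_one_cons (by omega)
        have ih' := ih (i + 1) (by omega) (by omega)
        by_cases hv : PySem.List.pyGetD xs i 0 = 0
        · -- zero value: A reopens; B skips the index
          constructor
          · intro p c
            rw [hcons]
            simp only [List.foldl_cons]
            obtain ⟨p', hp'⟩ := stepA_zero xs i hi0 hv p 0 c
            rw [hp', ih'.1 p' c]
            conv_rhs => rw [outerB]
            rw [dif_pos hi, dif_pos hv]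
          · intro p z c hz
            rw [hcons]
            simp only [List.foldl_cons]
            obtain ⟨p', hp'⟩ := stepA_zero xs i hi0 hv p z c
            rw [hp', ih'.1 p' c]
            rw [segEndB_stop xs last i (by tauto)]
            conv_rhs => rw [outerB]
            rw [dif_pos hi, dif_pos hv]
        · -- nonzero value
          have hseg : segEndB xs last i = segEndB xs last (i + 1) :=
            segEndB_step xs last i hi hv
          have hlt : i < segEndB xs last i := by
            have := segEndB_le xs last (i + 1); omega
          have hrcons : PySem.List.pyRange i (segEndB xs last i) 1
              = i :: PySem.List.pyRange (i + 1) (segEndB xs last i) 1 :=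
            PySem.List.pyRange_one_cons hlt
          by_cases hpk : PySem.List.pyGetD xs i 0 > PySem.List.pyGetD xs (i + 1) 0 ∧
              PySem.List.pyGetD xs i 0 > PySem.List.pyGetD xs (i - 1) 0
          · constructor
            · intro p c
              rw [hcons]
              simp only [List.foldl_cons]
              rw [stepA_peak_open xs i hi0 hv hpk p c,
                ih'.2 (some (PySem.List.pyGetD xs i 0)) (PySem.List.pyGetD xs i 0)
                  (if PySem.List.pyGetD xs i 0 > PEAK_THRESHOLD then c + 1 else c) hv]
              conv_rhs => rw [outerB]
              rw [dif_pos hi, dif_neg hv, hrcons]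
              have hpk' : PySem.List.pyGetD xs i 0 > PySem.List.pyGetD xs (i - 1) 0 ∧
                  PySem.List.pyGetD xs i 0 > PySem.List.pyGetD xs (i + 1) 0 := ⟨hpk.2, hpk.1⟩
              rw [firstPeakB, if_pos hpk', hseg]
            · intro p z c hz
              rw [hcons]
              simp only [List.foldl_cons]
              rw [stepA_peak_closed xs i hi0 hv hpk p z c hz,
                ih'.2 p (PySem.List.pyGetD xs i 0) c hv, hseg]
          · constructor
            · intro p c
              rw [hcons]
              simp only [List.foldl_cons]
              rw [stepA_nopeak xs i hi0 hv hpk p 0 c, ih'.1 p c,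
                outerB_eq_seg xs last (i + 1) c]
              conv_rhs => rw [outerB]
              rw [dif_pos hi, dif_neg hv, hrcons]
              have hpk' : ¬ (PySem.List.pyGetD xs i 0 > PySem.List.pyGetD xs (i - 1) 0 ∧
                  PySem.List.pyGetD xs i 0 > PySem.List.pyGetD xs (i + 1) 0) := by tauto
              rw [firstPeakB, if_neg hpk', hseg]
            · intro p z c hz
              rw [hcons]
              simp only [List.foldl_cons]
              rw [stepA_nopeak xs i hi0 hv hpk p z c, ih'.2 p z c hz, hseg]
      · -- i > last: both sides are the count
        have hnil : PySem.List.pyRange i (last + 1) 1 = [] :=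
          PySem.List.pyRange_one_eq_nil (by omega)
        constructor
        · intro p c
          rw [hnil]; simp only [List.foldl_nil]
          rw [outerB]; rw [dif_neg hi]
        · intro p z c hz
          rw [hnil]; simp only [List.foldl_nil]
          rw [segEndB_stop xs last i (by tauto)]
          rw [outerB]; rw [dif_neg hi]

-- ===== VERDICT (by name: the statement is the Claim_ definition above) =====
theorem numOfPeaks_spec : Claim_equal_numOfPeaks := by
  intro xs _
  show numOfPeaks xs = numOfPeaks_alt xs
  unfold numOfPeaks numOfPeaks_alt
  by_cases h1 : (xs.length : Int) - 1 ≤ 0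
  · rw [PySem.List.pyRange_one_eq_nil (a := 0) h1]
    simp only [List.foldl_nil]
    rw [outerB]; rw [dif_neg (by omega)]
  · rw [PySem.List.pyRange_one_cons (a := 0) (b := (xs.length : Int) - 1) (by omega)]
    simp only [List.foldl_cons, zero_add]
    have hA0 : stepA xs (none, 0, 0) 0 = (none, 0, 0) := by simp [stepA]
    rw [hA0]
    have h := (mainInv xs ((xs.length : Int) - 2) ((xs.length : Int) - 2).toNat 1
      (by omega) (by omega)).1 none 0
    have heq : (xs.length : Int) - 2 + 1 = (xs.length : Int) - 1 := by ring
    rw [heq] at h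
    exact h
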